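-- pv_equiv track=rewrite | github.com/Wind-Maker1001/AIWF | apps/glue-python/aiwf/cleaning_spec_v2.py | reason_codes_from_quality_errors
-- ===== SOURCE A (Python) =====
-- from typing import Any, Dict, Iterable, Mapping, Optional, Sequence
--
-- def _merge_unique_strings(*groups: Iterable[str]) -> list[str]:
--     seen: set[str] = set()
--     out: list[str] = []
--     for group in groups:
--         for item in group:
--             text = str(item).strip()
--             if not text or text in seen:
--                 continue
--             seen.add(text)
--             out.append(text)
--     return out
--
-- def reason_codes_from_quality_errors(errors: Sequence[Any]) -> list[str]:
--     codes: list[str] = []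
--     for item in errors:
--         text = str(item or "").strip().lower()
--         if not text:
--             continue
--         if "header_confidence" in text:
--             codes.append("header_low_confidence")
--         elif "ocr_confidence" in text or "low_confidence_block_ratio" in text:
--             codes.append("ocr_low_confidence")
--         elif "required_columns missing" in text:
--             codes.append("required_fields_missing")
--         elif "required_missing_ratio" in text:
--             codes.append("required_missing")
--         elif "numeric_parse_rate" in text:
--             codes.append("numeric_parse_low")
--         elif "date_parse_rate" in text:
--             codes.append("date_parse_low")
--         elif "duplicate_key_ratio" in text or "duplicate_line_ratio" in text:
--             codes.append("duplicate_excess")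
--         elif "blank_row_ratio" in text:
--             codes.append("blank_rows_excess")
--         elif "empty_text_block_ratio" in text:
--             codes.append("empty_text_excess")
--         elif "produced no rows" in text:
--             codes.append("no_rows_extracted")
--         else:
--             codes.append("quality_blocked")
--     return _merge_unique_strings(codes)
-- ===== SOURCE B (Python) =====
-- _SUBSTRING_CODES = [
--     ("header_confidence", "header_low_confidence"),
--     ("ocr_confidence", "ocr_low_confidence"),
--     ("low_confidence_block_ratio", "ocr_low_confidence"),
--     ("required_columns missing", "required_fields_missing"),
--     ("required_missing_ratio", "required_missing"),
--     ("numeric_parse_rate", "numeric_parse_low"),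
--     ("date_parse_rate", "date_parse_low"),
--     ("duplicate_key_ratio", "duplicate_excess"),
--     ("duplicate_line_ratio", "duplicate_excess"),
--     ("blank_row_ratio", "blank_rows_excess"),
--     ("empty_text_block_ratio", "empty_text_excess"),
--     ("produced no rows", "no_rows_extracted"),
-- ]
--
--
-- def _code_for(text):
--     return next((code for sub, code in _SUBSTRING_CODES if sub in text),
--                 "quality_blocked")
--
--
-- def reason_codes_from_quality_errors(errors):
--     # Right-to-left pass: the accumulator is the answer for the suffix already
--     # processed; prepending a code and filtering out its later duplicates keeps
--     # exactly the first-occurrence order, with no seen-set bookkeeping.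
--     out = []
--     for item in reversed(errors):
--         text = str(item or "").strip().lower()
--         if not text:
--             continue
--         code = _code_for(text)
--         out = [code] + [c for c in out if c != code]
--     return out
-- ===== Notes on version B (the rewrite author's own statement) =====
-- stated objective: alternative
-- what changed: B walks the error list right-to-left, maintaining the finished answer for the processed suffix by prepending each code and filtering out its later duplicates (no seen set, no staged dedup pass), and classifies via a single flat (substring, code) priority list consumed by next() instead of the ten-branch elif chain.
import Mathlib
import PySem

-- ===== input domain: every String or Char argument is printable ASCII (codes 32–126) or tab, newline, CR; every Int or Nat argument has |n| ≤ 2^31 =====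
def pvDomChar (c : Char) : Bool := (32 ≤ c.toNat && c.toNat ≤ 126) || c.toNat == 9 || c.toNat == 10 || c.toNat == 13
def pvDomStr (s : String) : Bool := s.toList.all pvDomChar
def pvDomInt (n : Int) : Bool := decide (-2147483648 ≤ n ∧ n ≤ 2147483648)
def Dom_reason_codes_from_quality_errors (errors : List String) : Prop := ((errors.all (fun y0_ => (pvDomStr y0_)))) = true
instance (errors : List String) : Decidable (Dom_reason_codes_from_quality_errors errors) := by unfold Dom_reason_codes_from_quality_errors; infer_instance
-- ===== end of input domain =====

-- B replaces A's forward classify-then-dedup (seen-set helper) by a single right-to-left pass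
-- that keeps the finished answer for the processed suffix (prepend + filter duplicates), and
-- classifies via a flat (substring, code) list scanned by find?; objective: alternative.


-- ===== PORT A =====
-- A's inline elif chain, as a named helper (same branches, same order)
def classifyA (t : String) : String :=
  if PySem.Str.isIn "header_confidence" t then "header_low_confidence"
  else if PySem.Str.isIn "ocr_confidence" t || PySem.Str.isIn "low_confidence_block_ratio" t then "ocr_low_confidence"
  else if PySem.Str.isIn "required_columns missing" t then "required_fields_missing"
  else if PySem.Str.isIn "required_missing_ratio" t then "required_missing"
  else if PySem.Str.isIn "numeric_parse_rate" t then "numeric_parse_low"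
  else if PySem.Str.isIn "date_parse_rate" t then "date_parse_low"
  else if PySem.Str.isIn "duplicate_key_ratio" t || PySem.Str.isIn "duplicate_line_ratio" t then "duplicate_excess"
  else if PySem.Str.isIn "blank_row_ratio" t then "blank_rows_excess"
  else if PySem.Str.isIn "empty_text_block_ratio" t then "empty_text_excess"
  else if PySem.Str.isIn "produced no rows" t then "no_rows_extracted"
  else "quality_blocked"

-- _merge_unique_strings applied to the single group `codes` (seen set + out list, re-stripping)
def mergeUniqueAux (seen : PySem.Set String) (out : List String) : List String → List String
  | [] => out
  | x :: xs =>
    let t := PySem.Str.strip x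
    if t = "" ∨ PySem.Set.contains seen t then mergeUniqueAux seen out xs
    else mergeUniqueAux (PySem.Set.add seen t) (out ++ [t]) xs

def reason_codes_from_quality_errors (errors : List String) : List String :=
  let codes := errors.foldl (fun codes item =>
    let text := PySem.Str.lower (PySem.Str.strip (if item = "" then "" else item))  -- str(item or "").strip().lower()
    if text = "" then codes else codes ++ [classifyA text]) []
  mergeUniqueAux PySem.Set.empty [] codes

-- ===== PORT B =====
def pvSubCodes : List (String × String) :=
  [ ("header_confidence", "header_low_confidence"),
    ("ocr_confidence", "ocr_low_confidence"),
    ("low_confidence_block_ratio", "ocr_low_confidence"),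
    ("required_columns missing", "required_fields_missing"),
    ("required_missing_ratio", "required_missing"),
    ("numeric_parse_rate", "numeric_parse_low"),
    ("date_parse_rate", "date_parse_low"),
    ("duplicate_key_ratio", "duplicate_excess"),
    ("duplicate_line_ratio", "duplicate_excess"),
    ("blank_row_ratio", "blank_rows_excess"),
    ("empty_text_block_ratio", "empty_text_excess"),
    ("produced no rows", "no_rows_extracted") ]

-- next((code for sub, code in _SUBSTRING_CODES if sub in text), "quality_blocked")
def codeFor (t : String) : String :=
  match pvSubCodes.find? (fun p => PySem.Str.isIn p.1 t) with
  | some p => p.2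
  | none => "quality_blocked"

def reason_codes_from_quality_errors_alt (errors : List String) : List String :=
  errors.reverse.foldl (fun out item =>
    let text := PySem.Str.lower (PySem.Str.strip (if item = "" then "" else item))
    if text = "" then out
    else
      let code := codeFor text
      code :: out.filter (fun c => c ≠ code)) []

-- ===== PRECONDITION & SPEC =====
def Spec_reason_codes_from_quality_errors (errors : List String) (out : List String) : Prop := out = reason_codes_from_quality_errors_alt errors
instance (errors : List String) (out : List String) : Decidable (Spec_reason_codes_from_quality_errors errors out) := by unfold Spec_reason_codes_from_quality_errors; infer_instance

-- ===== CLAIM (what is proved, stated in full; the proofs are below) =====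
def Claim_equal_reason_codes_from_quality_errors : Prop := ∀ (errors : List String), Dom_reason_codes_from_quality_errors errors → Spec_reason_codes_from_quality_errors errors (reason_codes_from_quality_errors errors)

-- ===== LEMMAS AND PROOFS =====

-- first-occurrence dedup, defined back-to-front (proof-only helper)
def dedupFirst : List String → List String
  | [] => []
  | c :: cs => c :: (dedupFirst cs).filter (fun y => y ≠ c)

lemma mem_dedupFirst {x : String} {l : List String} (h : x ∈ dedupFirst l) : x ∈ l := by
  induction l with
  | nil => simp [dedupFirst] at h
  | cons c cs ih =>
    rcases List.mem_cons.mp h with rfl | h'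
    · exact List.mem_cons_self ..
    · exact List.mem_cons_of_mem _ (ih (List.mem_of_mem_filter h'))

-- the flat-list scan computes exactly A's elif chain
set_option maxHeartbeats 1000000 in
lemma classify_eq (t : String) : classifyA t = codeFor t := by
  unfold classifyA codeFor pvSubCodes
  by_cases h1 : PySem.Str.isIn "header_confidence" t = true
  · simp only [List.find?, h1, if_true]
  · by_cases h2 : PySem.Str.isIn "ocr_confidence" t = true
    · simp only [List.find?, h1, h2, Bool.true_or, if_true, Bool.false_eq_true, if_false]
    · by_cases h3 : PySem.Str.isIn "low_confidence_block_ratio" t = true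
      · simp only [List.find?, h1, h2, h3, Bool.false_or, if_true, Bool.false_eq_true, if_false]
      · by_cases h4 : PySem.Str.isIn "required_columns missing" t = true
        · simp only [List.find?, h1, h2, h3, h4, Bool.false_or, if_true, Bool.false_eq_true, if_false]
        · by_cases h5 : PySem.Str.isIn "required_missing_ratio" t = true
          · simp only [List.find?, h1, h2, h3, h4, h5, Bool.false_or, if_true, Bool.false_eq_true, if_false]
          · by_cases h6 : PySem.Str.isIn "numeric_parse_rate" t = true
            · simp only [List.find?, h1, h2, h3, h4, h5, h6, Bool.false_or, if_true, Bool.false_eq_true, if_false]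
            · by_cases h7 : PySem.Str.isIn "date_parse_rate" t = true
              · simp only [List.find?, h1, h2, h3, h4, h5, h6, h7, Bool.false_or, if_true, Bool.false_eq_true, if_false]
              · by_cases h8 : PySem.Str.isIn "duplicate_key_ratio" t = true
                · simp only [List.find?, h1, h2, h3, h4, h5, h6, h7, h8, Bool.true_or, Bool.false_or, if_true, Bool.false_eq_true, if_false]
                · by_cases h9 : PySem.Str.isIn "duplicate_line_ratio" t = true
                  · simp only [List.find?, h1, h2, h3, h4, h5, h6, h7, h8, h9, Bool.false_or, if_true, Bool.false_eq_true, if_false]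
                  · by_cases h10 : PySem.Str.isIn "blank_row_ratio" t = true
                    · simp only [List.find?, h1, h2, h3, h4, h5, h6, h7, h8, h9, h10, Bool.false_or, if_true, Bool.false_eq_true, if_false]
                    · by_cases h11 : PySem.Str.isIn "empty_text_block_ratio" t = true
                      · simp only [List.find?, h1, h2, h3, h4, h5, h6, h7, h8, h9, h10, h11, Bool.false_or, if_true, Bool.false_eq_true, if_false]
                      · by_cases h12 : PySem.Str.isIn "produced no rows" t = true
                        · simp only [List.find?, h1, h2, h3, h4, h5, h6, h7, h8, h9, h10, h11, h12, Bool.false_or, if_true, Bool.false_eq_true, if_false]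
                        · simp only [List.find?, h1, h2, h3, h4, h5, h6, h7, h8, h9, h10, h11, h12, Bool.false_or, Bool.false_eq_true, if_false]

-- every code either port emits is a nonempty whitespace-free literal
lemma classify_props (t : String) :
    PySem.Str.strip (classifyA t) = classifyA t ∧ classifyA t ≠ "" := by
  unfold classifyA
  split_ifs <;> exact ⟨by decide, by decide⟩

-- A's collection loop produces the normalized, filtered, classified code list
def codesOf (errors : List String) : List String :=
  ((errors.map (fun item => PySem.Str.lower (PySem.Str.strip (if item = "" then "" else item)))).filter
    (fun t => t ≠ "")).map classifyA

lemma loopA_eq (errors : List String) (acc : List String) :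
    errors.foldl (fun codes item =>
      let text := PySem.Str.lower (PySem.Str.strip (if item = "" then "" else item))
      if text = "" then codes else codes ++ [classifyA text]) acc
    = acc ++ codesOf errors := by
  induction errors generalizing acc with
  | nil => simp [codesOf]
  | cons x xs ih =>
    simp only [List.foldl_cons, codesOf, List.map_cons, List.filter_cons]
    by_cases h : PySem.Str.lower (PySem.Str.strip (if x = "" then "" else x)) = ""
    · rw [if_pos h, ih]; simp [codesOf, h]
    · rw [if_neg h, ih]; simp [codesOf, h]

-- dedupFirst commutes with filtering by any value predicate
lemma filter_dedupFirst (p : String → Bool) (l : List String) :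
    (dedupFirst l).filter p = dedupFirst (l.filter p) := by
  induction l with
  | nil => simp [dedupFirst]
  | cons c cs ih =>
    by_cases hp : p c = true
    · have h1 : List.filter p (dedupFirst (c :: cs))
          = c :: List.filter p ((dedupFirst cs).filter (fun y => y ≠ c)) := by
        simp [dedupFirst, hp]
      rw [h1, List.filter_comm, ih, List.filter_cons, if_pos (by simpa using hp)]
      simp [dedupFirst]
    · have hfil : (dedupFirst (cs.filter p)).filter (fun y : String => decide (y ≠ c))
          = dedupFirst (cs.filter p) := by
        apply List.filter_eq_self.mpr
        intro a ha
        have hpa := List.of_mem_filter (mem_dedupFirst ha)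
        simp only [decide_eq_true_eq, ne_eq]
        rintro rfl; exact hp hpa
      have h1 : List.filter p (dedupFirst (c :: cs))
          = List.filter p ((dedupFirst cs).filter (fun y => y ≠ c)) := by
        simp [dedupFirst, hp]
      rw [h1, List.filter_comm, ih, List.filter_cons, if_neg (by simpa using hp)]
      exact hfil

-- the seen-set/out loop, on stripped nonempty strings, is dedupFirst of the unseen elements
lemma merge_eq (xs : List String) (seen : PySem.Set String) (out : List String)
    (h : ∀ x ∈ xs, PySem.Str.strip x = x ∧ x ≠ "") :
    mergeUniqueAux seen out xs
      = out ++ dedupFirst (xs.filter (fun x => !(PySem.Set.contains seen x))) := by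
  induction xs generalizing seen out with
  | nil => simp [mergeUniqueAux, dedupFirst]
  | cons x xs ih =>
    obtain ⟨hs, hne⟩ := h x (List.mem_cons_self ..)
    have hrest : ∀ y ∈ xs, PySem.Str.strip y = y ∧ y ≠ "" :=
      fun y hy => h y (List.mem_cons_of_mem _ hy)
    unfold mergeUniqueAux
    simp only [hs]
    by_cases hc : PySem.Set.contains seen x = true
    · rw [if_pos (Or.inr hc), ih _ _ hrest, List.filter_cons, hc]
      simp
    · have hmem : x ∉ seen := by
        intro hm
        exact hc (by simpa [PySem.Set.contains_iff] using hm)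
      have hadd : PySem.Set.add seen x = seen ++ [x] := by
        simp [PySem.Set.add, hmem]
      have key : dedupFirst (xs.filter (fun a => !(PySem.Set.contains (PySem.Set.add seen x) a)))
          = (dedupFirst (xs.filter (fun a => !(PySem.Set.contains seen a)))).filter
              (fun y => y ≠ x) := by
        rw [filter_dedupFirst, List.filter_filter]
        apply congrArg
        apply List.filter_congr
        intro a _
        rw [hadd]
        simp [PySem.Set.contains, Bool.and_comm, eq_comm]
      rw [if_neg (by simp [hne, hmem]), ih _ _ hrest, List.filter_cons,
        if_pos (by simpa using hmem), key]
      simp [dedupFirst]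

-- B's reversed fold computes dedupFirst of the code list
lemma alt_eq (errors : List String) :
    reason_codes_from_quality_errors_alt errors = dedupFirst (codesOf errors) := by
  unfold reason_codes_from_quality_errors_alt
  rw [List.foldl_reverse]
  induction errors with
  | nil => simp [codesOf, dedupFirst]
  | cons x xs ih =>
    simp only [List.foldr_cons, codesOf, List.map_cons, List.filter_cons]
    by_cases h : PySem.Str.lower (PySem.Str.strip (if x = "" then "" else x)) = ""
    · simp only [h]
      simpa [codesOf] using ih
    · rw [ih]
      simp only [h, ne_eq, not_false_iff, decide_true, if_pos, List.map_cons]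
      rw [← classify_eq]
      simp [dedupFirst, codesOf]

-- ===== VERDICT (by name: the statement is the Claim_ definition above) =====
theorem reason_codes_from_quality_errors_spec : Claim_equal_reason_codes_from_quality_errors := by
  intro errors _
  unfold Spec_reason_codes_from_quality_errors reason_codes_from_quality_errors
  simp only [loopA_eq, List.nil_append]
  have hprops : ∀ x ∈ codesOf errors, PySem.Str.strip x = x ∧ x ≠ "" := by
    intro x hx
    obtain ⟨t, _, rfl⟩ := List.mem_map.mp hx
    exact classify_props t
  rw [merge_eq _ _ _ hprops, alt_eq, List.nil_append]
  congr 1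
  apply List.filter_eq_self.mpr
  intro a _
  simp [PySem.Set.contains, PySem.Set.empty]
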